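-- pv_equiv track=rewrite | github.com/loput12ouj35/2018-Smart-Contract-Crawler | analyzer.py | selectDepth
-- ===== SOURCE A (Python) =====
-- def selectDepth(code, pairs, targetDepth):
-- 	#first, extract ranges(pairs) whose depths are targetDepth or +1
-- 	slicedParts = []
-- 	sliced = []
-- 	(clx, crx) = (-1, -1)
-- 	for (depth, lx, rx) in pairs:
-- 		if depth == targetDepth:
-- 			if crx != -1:
-- 				sliced.append((clx, crx))
-- 				slicedParts.append(sliced)
-- 				sliced = []
-- 			(clx, crx) = (lx, rx)
-- 		elif depth == targetDepth + 1:
-- 			sliced.append((clx, lx))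
-- 			clx = rx
-- 	sliced.append((clx, crx))
-- 	slicedParts.append(sliced)
--
-- 	result = []
-- 	for part in slicedParts:
-- 		tmp = ''
-- 		for (lx, rx) in part:
-- 			candidate = code[lx + 1:rx]
-- 			tmp += candidate
-- 		result.append(tmp)
--
-- #	print (result)		##########print raw code
-- 	return result
-- ===== SOURCE B (Python) =====
-- def selectDepth(code, pairs, targetDepth):
-- 	# Single fused pass: accumulate slice text directly in a string instead of
-- 	# building the intermediate list-of-range-lists.
-- 	result = []
-- 	tmp = ''
-- 	(clx, crx) = (-1, -1)
-- 	for (depth, lx, rx) in pairs: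
-- 		if depth == targetDepth:
-- 			if crx != -1:
-- 				result.append(tmp + code[clx + 1:crx])
-- 				tmp = ''
-- 			(clx, crx) = (lx, rx)
-- 		elif depth == targetDepth + 1:
-- 			tmp += code[clx + 1:lx]
-- 			clx = rx
-- 	result.append(tmp + code[clx + 1:crx])
-- 	return result
-- ===== Notes on version B (the rewrite author's own statement) =====
-- stated objective: simpler
-- what changed: Fused A's two passes into a single loop that accumulates the slice text in a running string, eliminating the intermediate list-of-range-lists (slicedParts/sliced) entirely.
import Mathlib
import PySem

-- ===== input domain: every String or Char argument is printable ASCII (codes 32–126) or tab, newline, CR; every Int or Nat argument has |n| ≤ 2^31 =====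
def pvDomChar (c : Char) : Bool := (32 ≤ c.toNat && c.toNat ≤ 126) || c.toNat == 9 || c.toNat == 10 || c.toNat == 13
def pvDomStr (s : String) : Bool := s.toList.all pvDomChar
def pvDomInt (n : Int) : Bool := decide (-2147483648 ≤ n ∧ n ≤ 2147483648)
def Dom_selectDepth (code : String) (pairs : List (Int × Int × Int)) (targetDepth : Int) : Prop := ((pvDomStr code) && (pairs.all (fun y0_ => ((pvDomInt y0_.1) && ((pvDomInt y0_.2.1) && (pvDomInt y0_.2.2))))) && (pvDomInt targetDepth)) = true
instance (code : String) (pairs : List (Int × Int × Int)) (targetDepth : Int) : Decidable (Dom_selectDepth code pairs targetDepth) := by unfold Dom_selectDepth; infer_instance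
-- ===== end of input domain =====

-- B fuses A's two passes into one, accumulating slice text in a running string
-- instead of building the intermediate list of range lists (objective: simpler).

-- ===== PORT A =====
-- first loop's step: state (slicedParts, sliced, clx, crx)
def pvStepA (targetDepth : Int)
    (st : List (List (Int × Int)) × List (Int × Int) × Int × Int)
    (p : Int × Int × Int) : List (List (Int × Int)) × List (Int × Int) × Int × Int :=
  let (slicedParts, sliced, clx, crx) := st
  let (depth, lx, rx) := p
  if depth = targetDepth then
    if crx ≠ -1 then
      (slicedParts ++ [sliced ++ [(clx, crx)]], [], lx, rx)
    else
      (slicedParts, sliced, lx, rx)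
  else if depth = targetDepth + 1 then
    (slicedParts, sliced ++ [(clx, lx)], rx, crx)
  else
    (slicedParts, sliced, clx, crx)

-- second loop's inner loop: tmp += code[lx+1:rx] over a part
def pvRender (code : String) (part : List (Int × Int)) : String :=
  part.foldl (fun tmp lr => tmp ++ PySem.Str.slice code (some (lr.1 + 1)) (some lr.2)) ""

def selectDepth (code : String) (pairs : List (Int × Int × Int)) (targetDepth : Int) : List String :=
  let st := pairs.foldl (pvStepA targetDepth) ([], [], -1, -1)
  let slicedParts := st.1 ++ [st.2.1 ++ [(st.2.2.1, st.2.2.2)]]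
  slicedParts.foldl (fun result part => result ++ [pvRender code part]) []

-- ===== PORT B =====
-- single fused pass: state (result, tmp, clx, crx)
def pvStepB (code : String) (targetDepth : Int)
    (st : List String × String × Int × Int)
    (p : Int × Int × Int) : List String × String × Int × Int :=
  let (result, tmp, clx, crx) := st
  let (depth, lx, rx) := p
  if depth = targetDepth then
    if crx ≠ -1 then
      (result ++ [tmp ++ PySem.Str.slice code (some (clx + 1)) (some crx)], "", lx, rx)
    else
      (result, tmp, lx, rx)
  else if depth = targetDepth + 1 then
    (result, tmp ++ PySem.Str.slice code (some (clx + 1)) (some lx), rx, crx)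
  else
    (result, tmp, clx, crx)

def selectDepth_alt (code : String) (pairs : List (Int × Int × Int)) (targetDepth : Int) : List String :=
  let st := pairs.foldl (pvStepB code targetDepth) ([], "", -1, -1)
  st.1 ++ [st.2.1 ++ PySem.Str.slice code (some (st.2.2.1 + 1)) (some st.2.2.2)]

-- ===== PRECONDITION & SPEC =====
def Spec_selectDepth (code : String) (pairs : List (Int × Int × Int)) (targetDepth : Int) (out : List String) : Prop := out = selectDepth_alt code pairs targetDepth
instance (code : String) (pairs : List (Int × Int × Int)) (targetDepth : Int) (out : List String) : Decidable (Spec_selectDepth code pairs targetDepth out) := by unfold Spec_selectDepth; infer_instance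

-- ===== CLAIM (what is proved, stated in full; the proofs are below) =====
def Claim_equal_selectDepth : Prop := ∀ (code : String) (pairs : List (Int × Int × Int)) (targetDepth : Int), Dom_selectDepth code pairs targetDepth → Spec_selectDepth code pairs targetDepth (selectDepth code pairs targetDepth)

-- ===== LEMMAS AND PROOFS =====

-- rendering a part with one extra range appends that range's slice
theorem pvRender_append_single (code : String) (part : List (Int × Int)) (lr : Int × Int) :
    pvRender code (part ++ [lr]) =
      pvRender code part ++ PySem.Str.slice code (some (lr.1 + 1)) (some lr.2) := by
  simp [pvRender, List.foldl_append]

-- B's loop state abstracts A's: results are rendered parts, tmp renders the pending sliced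
theorem pvStep_invariant (code : String) (targetDepth : Int)
    (pairs : List (Int × Int × Int))
    (sp : List (List (Int × Int))) (sl : List (Int × Int)) (clx crx : Int) :
    pairs.foldl (pvStepB code targetDepth) (sp.map (pvRender code), pvRender code sl, clx, crx) =
      (let st := pairs.foldl (pvStepA targetDepth) (sp, sl, clx, crx)
       (st.1.map (pvRender code), pvRender code st.2.1, st.2.2.1, st.2.2.2)) := by
  induction pairs generalizing sp sl clx crx with
  | nil => rfl
  | cons p rest ih =>
    obtain ⟨depth, lx, rx⟩ := p
    simp only [List.foldl_cons]
    by_cases h1 : depth = targetDepth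
    · by_cases h2 : crx ≠ -1
      · have : pvStepB code targetDepth (sp.map (pvRender code), pvRender code sl, clx, crx) (depth, lx, rx)
            = (((sp ++ [sl ++ [(clx, crx)]]).map (pvRender code)), pvRender code [], lx, rx) := by
          simp [pvStepB, h1, h2, pvRender]
        rw [this, ih]
        simp [pvStepA, h1, h2]
      · have : pvStepB code targetDepth (sp.map (pvRender code), pvRender code sl, clx, crx) (depth, lx, rx)
            = (sp.map (pvRender code), pvRender code sl, lx, rx) := by
          simp [pvStepB, h1, h2]
        rw [this, ih]
        simp [pvStepA, h1, h2]
    · by_cases h2 : depth = targetDepth + 1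
      · have : pvStepB code targetDepth (sp.map (pvRender code), pvRender code sl, clx, crx) (depth, lx, rx)
            = (sp.map (pvRender code), pvRender code (sl ++ [(clx, lx)]), rx, crx) := by
          simp [pvStepB, h2, pvRender_append_single]
        rw [this, ih]
        simp [pvStepA, h1, h2]
      · have : pvStepB code targetDepth (sp.map (pvRender code), pvRender code sl, clx, crx) (depth, lx, rx)
            = (sp.map (pvRender code), pvRender code sl, clx, crx) := by
          simp [pvStepB, h1, h2]
        rw [this, ih]
        simp [pvStepA, h1, h2]

-- A's second loop is a map over the collected parts
theorem pvFoldl_render_eq_map (code : String) (parts : List (List (Int × Int))) (acc : List String) :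
    parts.foldl (fun result part => result ++ [pvRender code part]) acc = acc ++ parts.map (pvRender code) := by
  induction parts generalizing acc with
  | nil => simp
  | cons p rest ih => simp [ih]

-- ===== VERDICT (by name: the statement is the Claim_ definition above) =====
theorem selectDepth_spec : Claim_equal_selectDepth := by
  intro code pairs targetDepth _
  show selectDepth code pairs targetDepth = selectDepth_alt code pairs targetDepth
  unfold selectDepth selectDepth_alt
  have h := pvStep_invariant code targetDepth pairs [] [] (-1) (-1)
  simp only [List.map_nil, pvRender, List.foldl_nil] at h
  rw [h, pvFoldl_render_eq_map]
  simp only [List.nil_append, List.map_append, List.map_cons, List.map_nil]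
  rw [pvRender_append_single]
  simp [pvRender]
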